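-- pv_equiv track=rewrite | github.com/phat-code-hub/Public-Code | Python/Longest Common String.py | search_words_list
-- ===== SOURCE A (Python) =====
-- def search_words_list(data):
--     sub_str=[]
--     #Find the shortest word in list
--     min_wd=min(data, key=len)
--     #expand keyword for search
--     for i in range(len(min_wd)):
--         for j in range(i+1,len(min_wd)+1):
--             sub_str.append(min_wd[i:j])
--     #Sort result by the length in descendent order
--     len_sorted_list=sorted(sub_str,key=len,reverse=True)
--     return len_sorted_list
-- ===== SOURCE B (Python) =====
-- def search_words_list(data):
--     min_wd = min(data, key=len)
--     out = []
--     L = len(min_wd)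
--     while L > 0:
--         w = min_wd
--         while len(w) >= L:
--             out.append(w[:L])
--             w = w[1:]
--         L -= 1
--     return out
-- ===== Notes on version B (the rewrite author's own statement) =====
-- stated objective: simpler
-- what changed: B never sorts and never indexes: it walks lengths L from len(min_wd) down to 1 and, for each L, slides a window by repeatedly taking the L-prefix and chopping the first character off the word, emitting substrings already in length-descending, start-ascending order.
import Mathlib
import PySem

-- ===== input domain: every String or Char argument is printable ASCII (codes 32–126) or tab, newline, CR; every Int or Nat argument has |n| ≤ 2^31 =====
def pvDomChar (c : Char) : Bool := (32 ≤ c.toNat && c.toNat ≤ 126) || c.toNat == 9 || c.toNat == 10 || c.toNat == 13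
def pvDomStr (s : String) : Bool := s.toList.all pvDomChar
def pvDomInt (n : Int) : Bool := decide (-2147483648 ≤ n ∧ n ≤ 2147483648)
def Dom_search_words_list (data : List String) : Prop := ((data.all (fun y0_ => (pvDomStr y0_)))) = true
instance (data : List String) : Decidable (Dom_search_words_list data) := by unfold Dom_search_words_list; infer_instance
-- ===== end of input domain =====

-- B never sorts and never indexes: it slides a window over the shortest word by chopping its
-- front, for lengths L from len down to 1, so A's sorted(...) pass disappears (objective: simpler).

-- ===== PORT A =====
def search_words_list (data : List String) : List String :=
  match PySem.List.min? data (fun w => PySem.Str.len w) with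
  | none => []   -- Python raises ValueError on empty data; excluded by Pre_
  | some min_wd =>
    let sub_str :=
      (PySem.List.pyRange 0 (PySem.Str.len min_wd) 1).foldl (fun acc i =>
        (PySem.List.pyRange (i + 1) (PySem.Str.len min_wd + 1) 1).foldl (fun acc2 j =>
          acc2 ++ [PySem.Str.slice min_wd (some i) (some j)]) acc) []
    PySem.List.sorted sub_str (fun s => PySem.Str.len s) true

-- ===== PORT B =====
-- inner while of Source B: while len(w) >= L: out.append(w[:L]); w = w[1:]   (L ≥ 1 at every call)
def pvRow (L : Nat) : List Char → List String
  | [] => []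
  | c :: cs =>
    if L ≤ (c :: cs).length then String.ofList ((c :: cs).take L) :: pvRow L cs else []

-- outer while of Source B: L counts down from len(min_wd) to 1
def pvRows : Nat → List Char → List String
  | 0, _ => []
  | L + 1, cs => pvRow (L + 1) cs ++ pvRows L cs

def search_words_list_alt (data : List String) : List String :=
  match PySem.List.min? data (fun w => PySem.Str.len w) with
  | none => []   -- Python raises ValueError on empty data; excluded by Pre_
  | some min_wd => pvRows min_wd.toList.length min_wd.toList

-- ===== PRECONDITION & SPEC =====
-- Pre_ excludes only the empty list, on which Python's min raises ValueError.
def Pre_search_words_list (data : List String) : Prop := data ≠ []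
instance (data : List String) : Decidable (Pre_search_words_list data) := by unfold Pre_search_words_list; infer_instance
def pvWitness_search_words_list : List String := (["abc", "de"])
def Spec_search_words_list (data : List String) (out : List String) : Prop := out = search_words_list_alt data
instance (data : List String) (out : List String) : Decidable (Spec_search_words_list data out) := by unfold Spec_search_words_list; infer_instance

-- ===== CLAIM (what is proved, stated in full; the proofs are below) =====
def Claim_equal_search_words_list : Prop := ∀ (data : List String), Dom_search_words_list data → Pre_search_words_list data → Spec_search_words_list data (search_words_list data)

-- ===== LEMMAS AND PROOFS =====

def pvBk {α : Type} (key : α → Int) (Ls : List Int) (p : List α) : List α :=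
  Ls.flatMap (fun k => p.filter (fun x => key x == k))

theorem pvMem_bk {α : Type} (key : α → Int) (Ls : List Int) (p : List α) (y : α)
    (h : y ∈ pvBk key Ls p) : key y ∈ Ls := by
  simp only [pvBk, List.mem_flatMap, List.mem_filter] at h
  obtain ⟨k, hk, _, he⟩ := h
  simpa [beq_iff_eq] using (beq_iff_eq.mp he ▸ hk)

theorem pvInsertBy_of_forall_before {α : Type} (before : α → α → Bool) (x : α) (l : List α)
    (h : ∀ y ∈ l, before x y = true) : PySem.List.insertBy before x l = x :: l := by
  cases l with
  | nil => rfl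
  | cons y ys => simp [PySem.List.insertBy, h y (by simp)]

theorem pvInsertBy_append_not {α : Type} (before : α → α → Bool) (x : α) (a b : List α)
    (h : ∀ y ∈ a, before x y = false) :
    PySem.List.insertBy before x (a ++ b) = a ++ PySem.List.insertBy before x b := by
  induction a with
  | nil => rfl
  | cons y ys ih =>
    have hy := h y (by simp)
    have ih' := ih (fun z hz => h z (by simp [hz]))
    simp [PySem.List.insertBy, hy, ih']
def pvBefore {α : Type} (key : α → Int) : α → α → Bool := fun a b => decide (key b < key a)

theorem pvIns {α : Type} (key : α → Int) (Ls : List Int) (p : List α) (x : α)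
    (hLs : Ls.Pairwise (· > ·)) (hx : key x ∈ Ls) :
    PySem.List.insertBy (pvBefore key) x (pvBk key Ls p) = pvBk key Ls (p ++ [x]) := by
  induction Ls with
  | nil => simp at hx
  | cons k Ls ih =>
    have hgt : ∀ k' ∈ Ls, k > k' := fun k' h' => (List.pairwise_cons.mp hLs).1 k' h'
    have hLs' := (List.pairwise_cons.mp hLs).2
    by_cases hxk : key x = k
    · -- x belongs to the front bucket
      have hfr : ∀ y ∈ p.filter (fun z => key z == k), pvBefore key x y = false := by
        intro y hy
        have := (List.mem_filter.mp hy).2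
        simp [pvBefore, beq_iff_eq.mp this, hxk]
      have hre : ∀ y ∈ pvBk key Ls p, pvBefore key x y = true := by
        intro y hy
        have hk' := pvMem_bk key Ls p y hy
        have := hgt _ hk'
        simp [pvBefore, hxk]; omega
      have : pvBk key (k :: Ls) p = p.filter (fun z => key z == k) ++ pvBk key Ls p := by
        simp [pvBk]
      rw [this, pvInsertBy_append_not _ _ _ _ hfr, pvInsertBy_of_forall_before _ _ _ hre]
      have hnot : ∀ k' ∈ Ls, ¬ (key x = k') := by intro k' h' he; have := hgt k' h'; omega
      simp [pvBk, List.filter_append, hxk]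
      apply List.flatMap_congr
      intro k' h'
      have : ¬ (key x = k') := hnot k' h'
      simp [this]
    · have hx' : key x ∈ Ls := by cases (List.mem_cons.mp hx) with
        | inl h => exact (hxk h).elim
        | inr h => exact h
      have hfr : ∀ y ∈ p.filter (fun z => key z == k), pvBefore key x y = false := by
        intro y hy
        have := beq_iff_eq.mp (List.mem_filter.mp hy).2
        have hlt := hgt _ hx'
        simp [pvBefore, this]; omega
      have : pvBk key (k :: Ls) p = p.filter (fun z => key z == k) ++ pvBk key Ls p := by
        simp [pvBk]
      rw [this, pvInsertBy_append_not _ _ _ _ hfr, ih hLs' hx']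
      simp [pvBk, List.filter_append, hxk]

theorem pvFold {α : Type} (key : α → Int) (Ls : List Int) (xs p : List α)
    (hLs : Ls.Pairwise (· > ·)) (hxs : ∀ x ∈ xs, key x ∈ Ls) :
    xs.foldl (fun acc x => PySem.List.insertBy (pvBefore key) x acc) (pvBk key Ls p)
      = pvBk key Ls (p ++ xs) := by
  induction xs generalizing p with
  | nil => simp
  | cons x xs ih =>
    simp only [List.foldl_cons]
    rw [pvIns key Ls p x hLs (hxs x (by simp)), ih (p ++ [x]) (fun z hz => hxs z (by simp [hz]))]
    simp

theorem pvSorted_eq_bk {α : Type} (key : α → Int) (Ls : List Int) (xs : List α)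
    (hLs : Ls.Pairwise (· > ·)) (hxs : ∀ x ∈ xs, key x ∈ Ls) :
    PySem.List.sorted xs key true = pvBk key Ls xs := by
  rw [PySem.List.sorted_rev_eq_foldl_insertBy]
  have h0 : pvBk key Ls ([] : List α) = [] := by simp [pvBk]
  have := pvFold key Ls xs [] hLs hxs
  rw [h0] at this
  simpa [pvBefore] using this
theorem pvLen_slice (w : String) (i j : Int) (h0 : 0 ≤ i) (hij : i ≤ j)
    (hj : j ≤ PySem.Str.len w) :
    PySem.Str.len (PySem.Str.slice w (some i) (some j)) = j - i := by
  rw [PySem.Str.len_eq] at hj ⊢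
  simp only [PySem.Str.slice, PySem.Chars.slice, String.toList_ofList] at *
  rw [PySem.List.length_slice]
  simp only [PySem.List.clampIdx]
  split_ifs <;> omega

theorem pvMem_pyRange_neg_one (a b x : Int) :
    x ∈ PySem.List.pyRange a b (-1) ↔ b < x ∧ x ≤ a := by
  rw [PySem.List.pyRange_neg_one]
  simp only [List.mem_map, List.mem_range]
  constructor
  · rintro ⟨k, hk, rfl⟩; omega
  · rintro ⟨h1, h2⟩; exact ⟨(a - x).toNat, by omega, by omega⟩

theorem pvFilter_pyRange_eq (a b c : Int) :
    (PySem.List.pyRange a b 1).filter (fun j => j == c)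
      = if a ≤ c ∧ c < b then [c] else [] := by
  by_cases hc : a ≤ c ∧ c < b
  · rw [if_pos hc, PySem.List.pyRange_one_append a c b (by omega) (by omega),
      PySem.List.pyRange_one_cons (show c < b by omega)]
    have h1 : (PySem.List.pyRange a c 1).filter (fun j => j == c) = [] := by
      rw [List.filter_eq_nil_iff]; intro j hj
      have := PySem.List.mem_pyRange_one.mp hj; simp; omega
    have h2 : (PySem.List.pyRange (c + 1) b 1).filter (fun j => j == c) = [] := by
      rw [List.filter_eq_nil_iff]; intro j hj
      have := PySem.List.mem_pyRange_one.mp hj; simp; omega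
    simp [List.filter_append, h1, h2]
  · rw [if_neg hc, List.filter_eq_nil_iff]
    intro j hj
    have := PySem.List.mem_pyRange_one.mp hj; simp; omega
def pvSubsA (w : String) : List String :=
  (PySem.List.pyRange 0 (PySem.Str.len w) 1).flatMap (fun i =>
    (PySem.List.pyRange (i + 1) (PySem.Str.len w + 1) 1).map (fun j =>
      PySem.Str.slice w (some i) (some j)))

theorem pvLen_nonneg (w : String) : 0 ≤ PySem.Str.len w := by
  rw [PySem.Str.len_eq]; exact Int.natCast_nonneg _

theorem pvBucketA (w : String) (k : Int) (hk : 1 ≤ k) (hkn : k ≤ PySem.Str.len w) :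
    (pvSubsA w).filter (fun x => PySem.Str.len x == k)
      = (PySem.List.pyRange 0 (PySem.Str.len w - k + 1) 1).map (fun i =>
          PySem.Str.slice w (some i) (some (i + k))) := by
  have hN := pvLen_nonneg w
  rw [pvSubsA, List.filter_flatMap]
  have hinner : ∀ i ∈ PySem.List.pyRange 0 (PySem.Str.len w) 1,
      ((PySem.List.pyRange (i + 1) (PySem.Str.len w + 1) 1).map (fun j =>
        PySem.Str.slice w (some i) (some j))).filter (fun x => PySem.Str.len x == k)
      = if i < PySem.Str.len w - k + 1 then [PySem.Str.slice w (some i) (some (i + k))] else [] := by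
    intro i hi
    have hi' := PySem.List.mem_pyRange_one.mp hi
    rw [List.filter_map]
    have hcong : ∀ j ∈ PySem.List.pyRange (i + 1) (PySem.Str.len w + 1) 1,
        ((fun x => PySem.Str.len x == k) ∘ (fun j => PySem.Str.slice w (some i) (some j))) j
          = (fun j => j == i + k) j := by
      intro j hj
      have hj' := PySem.List.mem_pyRange_one.mp hj
      simp only [Function.comp_apply]
      rw [pvLen_slice w i j (by omega) (by omega) (by omega)]
      rw [Bool.eq_iff_iff]
      simp only [beq_iff_eq]
      omega
    rw [List.filter_congr hcong, pvFilter_pyRange_eq]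
    by_cases h : i < PySem.Str.len w - k + 1
    · rw [if_pos (by omega), if_pos h]; simp
    · rw [if_neg (by omega), if_neg h]; rfl
  rw [List.flatMap_congr hinner,
    PySem.List.pyRange_one_append 0 (PySem.Str.len w - k + 1) (PySem.Str.len w) (by omega) (by omega),
    List.flatMap_append]
  have h1 : (PySem.List.pyRange 0 (PySem.Str.len w - k + 1) 1).flatMap
      (fun i => if i < PySem.Str.len w - k + 1 then [PySem.Str.slice w (some i) (some (i + k))] else [])
      = (PySem.List.pyRange 0 (PySem.Str.len w - k + 1) 1).map (fun i =>
          PySem.Str.slice w (some i) (some (i + k))) := by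
    rw [List.map_eq_flatMap]
    apply List.flatMap_congr
    intro i hi
    have := PySem.List.mem_pyRange_one.mp hi
    rw [if_pos (by omega)]
  have h2 : (PySem.List.pyRange (PySem.Str.len w - k + 1) (PySem.Str.len w) 1).flatMap
      (fun i => if i < PySem.Str.len w - k + 1 then [PySem.Str.slice w (some i) (some (i + k))] else [])
      = [] := by
    rw [List.flatMap_eq_nil_iff]
    intro i hi
    have := PySem.List.mem_pyRange_one.mp hi
    rw [if_neg (by omega)]
  rw [h1, h2, List.append_nil]
theorem pvPair_Ls (N : Int) : (PySem.List.pyRange N 0 (-1)).Pairwise (· > ·) := by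
  rw [PySem.List.pyRange_neg_one, List.pairwise_map]
  exact (List.pairwise_lt_range).imp (by intro a b hab; simp; omega)

theorem pvMem_subsA (w : String) (x : String) (hx : x ∈ pvSubsA w) :
    PySem.Str.len x ∈ PySem.List.pyRange (PySem.Str.len w) 0 (-1) := by
  simp only [pvSubsA, List.mem_flatMap, List.mem_map] at hx
  obtain ⟨i, hi, j, hj, rfl⟩ := hx
  have hi' := PySem.List.mem_pyRange_one.mp hi
  have hj' := PySem.List.mem_pyRange_one.mp hj
  rw [pvLen_slice w i j (by omega) (by omega) (by omega), pvMem_pyRange_neg_one]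
  omega

theorem pvKey (w : String) :
    PySem.List.sorted (pvSubsA w) (fun s => PySem.Str.len s) true
      = (PySem.List.pyRange (PySem.Str.len w) 0 (-1)).flatMap (fun L =>
          (PySem.List.pyRange 0 (PySem.Str.len w - L + 1) 1).map (fun i =>
            PySem.Str.slice w (some i) (some (i + L)))) := by
  rw [pvSorted_eq_bk (fun s => PySem.Str.len s) (PySem.List.pyRange (PySem.Str.len w) 0 (-1))
    (pvSubsA w) (pvPair_Ls _) (fun x hx => pvMem_subsA w x hx)]
  apply List.flatMap_congr
  intro k hk
  have := (pvMem_pyRange_neg_one _ _ _).mp hk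
  exact pvBucketA w k (by omega) (by omega)

theorem pvFoldA (w : String) :
    (PySem.List.pyRange 0 (PySem.Str.len w) 1).foldl (fun acc i =>
      (PySem.List.pyRange (i + 1) (PySem.Str.len w + 1) 1).foldl (fun acc2 j =>
        acc2 ++ [PySem.Str.slice w (some i) (some j)]) acc) []
    = pvSubsA w := by
  rw [PySem.List.foldl_congr_mem _ _ (fun acc i => acc ++
      (PySem.List.pyRange (i + 1) (PySem.Str.len w + 1) 1).map (fun j =>
        PySem.Str.slice w (some i) (some j))) _
    (by intro acc i _; rw [PySem.List.foldl_append_singleton_eq_map]),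
    PySem.List.foldl_append_eq_flatMap]
  rfl

-- pvRow in closed form: the L-windows are the L-prefixes of successive suffixes
theorem pvRow_eq (L : Nat) (hL : 1 ≤ L) (cs : List Char) :
    pvRow L cs
      = (List.range (cs.length + 1 - L)).map (fun i => String.ofList ((cs.drop i).take L)) := by
  induction cs with
  | nil =>
    have : 0 + 1 - L = 0 := by omega
    simp [pvRow, this]
  | cons c cs ih =>
    by_cases h : L ≤ (c :: cs).length
    · have hlen : (c :: cs).length + 1 - L = (cs.length + 1 - L) + 1 := by
        simp at h ⊢; omega
      rw [pvRow, if_pos h, hlen, List.range_succ_eq_map, List.map_cons, List.map_map, ih]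
      simp [Function.comp]
    · have hlen : (c :: cs).length + 1 - L = 0 := by simp at h ⊢; omega
      rw [pvRow, if_neg h, hlen]
      simp

theorem pvRange_neg_succ (m : Nat) :
    PySem.List.pyRange ((m : Int) + 1) 0 (-1)
      = ((m : Int) + 1) :: PySem.List.pyRange (m : Int) 0 (-1) := by
  rw [PySem.List.pyRange_neg_one, PySem.List.pyRange_neg_one]
  have h1 : (((m : Int) + 1) - 0).toNat = m + 1 := by omega
  have h2 : (((m : Int)) - 0).toNat = m := by omega
  rw [h1, h2, List.range_succ_eq_map, List.map_cons, List.map_map]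
  refine List.cons_eq_cons.mpr ⟨by push_cast; ring, ?_⟩
  apply List.map_congr_left
  intro k _
  simp

-- the flatMap form of A's sorted output is exactly B's nested while loops
theorem pvRowsFlat (w : String) (m : Nat) (hm : m ≤ w.toList.length) :
    (PySem.List.pyRange (m : Int) 0 (-1)).flatMap (fun L =>
      (PySem.List.pyRange 0 (PySem.Str.len w - L + 1) 1).map (fun i =>
        PySem.Str.slice w (some i) (some (i + L))))
    = pvRows m w.toList := by
  induction m with
  | zero => simp [pvRows]
  | succ m ih =>
    rw [show ((m + 1 : Nat) : Int) = (m : Int) + 1 by push_cast; ring,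
      pvRange_neg_succ, List.flatMap_cons, ih (by omega), pvRows]
    congr 1
    have hb : PySem.Str.len w - ((m : Int) + 1) + 1 = ((w.toList.length - (m + 1) + 1 : Nat) : Int) := by
      rw [PySem.Str.len_eq]; omega
    rw [hb, PySem.List.pyRange_zero_natCast, List.map_map,
      pvRow_eq (m + 1) (by omega) w.toList,
      show w.toList.length + 1 - (m + 1) = w.toList.length - (m + 1) + 1 by omega]
    apply List.map_congr_left
    intro k _
    simp only [Function.comp_apply]
    rw [show ((k : Int) + ((m : Int) + 1)) = ((k : Int) + ((m + 1 : Nat) : Int)) by push_cast; ring]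
    simp only [PySem.Str.slice, PySem.Chars.slice_eq_listSlice, PySem.List.slice_natCast_add]

-- ===== VERDICT (by name: the statement is the Claim_ definition above) =====
theorem search_words_list_spec : Claim_equal_search_words_list := by
  intro data _ hpre
  unfold Spec_search_words_list search_words_list search_words_list_alt
  cases h : PySem.List.min? data (fun w => PySem.Str.len w) with
  | none => exact absurd ((PySem.List.min?_eq_none_iff data (fun w => PySem.Str.len w)).mp h) hpre
  | some w =>
    simp only []
    rw [pvFoldA w, pvKey w, ← pvRowsFlat w w.toList.length (le_refl _)]
    rw [PySem.Str.len_eq]
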